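-- pv_equiv track=rewrite | github.com/devforfu/codility | disks.py | solution_slow
-- ===== SOURCE A (Python) =====
-- def solution_slow(a):
--     cuts = [(c - r, c + r) for c, r in enumerate(a)]
--     cuts.sort(key=lambda pair: pair[0])
--     n = len(cuts)
--     total = 0
--     for i in range(n):
--         l1, r1 = cuts[i]
--         for j in range(i+1, n):
--             l2, _ = cuts[j]
--             if l1 <= l2 <= r1:
--                 total += 1
--             if total > 10e7:
--                 return -1
--     return total
-- ===== SOURCE B (Python) =====
-- def _bisect_right(xs, x):
--     lo, hi = 0, len(xs)
--     while lo < hi: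
--         mid = (lo + hi) // 2
--         if x < xs[mid]:
--             hi = mid
--         else:
--             lo = mid + 1
--     return lo
--
--
-- def solution_slow(a):
--     cuts = sorted([(c - r, c + r) for c, r in enumerate(a)], key=lambda p: p[0])
--     starts = [l for l, _ in cuts]
--     total = 0
--     for i, (_, r) in enumerate(cuts):
--         hi = _bisect_right(starts, r)
--         if hi > i + 1:
--             total += hi - (i + 1)
--             if total > 10e7:
--                 return -1
--     return total
-- ===== Notes on version B (the rewrite author's own statement) =====
-- stated objective: faster
-- what changed: B keeps A's stable sort by left endpoint but replaces A's quadratic inner scan of the tail with a binary search over the sorted left endpoints (count of starts <= r_i, clamped below by i+1), keeping the same 10e7 cap and early -1.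
import Mathlib
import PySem

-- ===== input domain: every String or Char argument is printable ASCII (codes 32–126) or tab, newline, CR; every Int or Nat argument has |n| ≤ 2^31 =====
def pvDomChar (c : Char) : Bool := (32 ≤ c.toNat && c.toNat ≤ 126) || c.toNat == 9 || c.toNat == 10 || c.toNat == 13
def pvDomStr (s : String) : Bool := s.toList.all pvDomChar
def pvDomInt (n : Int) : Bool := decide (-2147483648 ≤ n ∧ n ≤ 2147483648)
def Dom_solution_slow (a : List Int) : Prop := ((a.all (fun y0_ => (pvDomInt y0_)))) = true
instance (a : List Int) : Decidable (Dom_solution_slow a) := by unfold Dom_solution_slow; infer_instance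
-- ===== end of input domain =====

-- B replaces A's quadratic inner scan by a per-element binary search over the sorted
-- left endpoints (same sort, same 10e7 cap), an O(n log n) algorithm.

-- ===== PORT A =====
-- inner 'for j' loop of A: walks the tail after position i; 'none' = early 'return -1'
def pvAInner (l1 r1 : Int) : List (Int × Int) → Int → Option Int
  | [], total => some total
  | (l2, _) :: rest, total =>
      let total' := if l1 ≤ l2 ∧ l2 ≤ r1 then total + 1 else total
      if total' > 100000000 then none else pvAInner l1 r1 rest total'

-- outer 'for i' loop of A over the sorted cuts
def pvAOuter : List (Int × Int) → Int → Option Int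
  | [], total => some total
  | (l1, r1) :: rest, total =>
      match pvAInner l1 r1 rest total with
      | none => none
      | some t => pvAOuter rest t

def solution_slow (a : List Int) : Int :=
  let cuts := (PySem.List.enumerate a).map (fun cr => (cr.1 - cr.2, cr.1 + cr.2))
  let cuts := PySem.List.sorted cuts (fun p => p.1) false
  match pvAOuter cuts 0 with
  | none => -1
  | some t => t

-- ===== PORT B =====
-- hand-written bisect_right of Source B (xs[mid] is always in range: mid < hi ≤ len xs)
def pvBisectRight (xs : List Int) (x : Int) (lo hi : Nat) : Nat :=
  if lo < hi then
    let mid := (lo + hi) / 2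
    if x < xs.getD mid 0 then pvBisectRight xs x lo mid
    else pvBisectRight xs x (mid + 1) hi
  else lo
termination_by hi - lo
decreasing_by all_goals omega

-- main loop of Source B: for i, (_, r) in enumerate(cuts); 'none' = early 'return -1'
def pvBLoop (starts : List Int) : List (Int × Int) → Nat → Int → Option Int
  | [], _, total => some total
  | (_, r) :: rest, i, total =>
      let hi := pvBisectRight starts r 0 starts.length
      if i + 1 < hi then
        let total' := total + ((hi : Int) - (i + 1))
        if total' > 100000000 then none else pvBLoop starts rest (i + 1) total'
      else pvBLoop starts rest (i + 1) total

def solution_slow_alt (a : List Int) : Int :=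
  let cuts := PySem.List.sorted
      ((PySem.List.enumerate a).map (fun cr => (cr.1 - cr.2, cr.1 + cr.2)))
      (fun p => p.1) false
  let starts := cuts.map (fun p => p.1)
  match pvBLoop starts cuts 0 0 with
  | none => -1
  | some t => t

-- ===== PRECONDITION & SPEC =====
def Spec_solution_slow (a : List Int) (out : Int) : Prop := out = solution_slow_alt a
instance (a : List Int) (out : Int) : Decidable (Spec_solution_slow a out) := by unfold Spec_solution_slow; infer_instance

-- ===== CLAIM (what is proved, stated in full; the proofs are below) =====
def Claim_equal_solution_slow : Prop := ∀ (a : List Int), Dom_solution_slow a → Spec_solution_slow a (solution_slow a)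

-- ===== LEMMAS AND PROOFS =====

-- pure pair count of A's inner loop over one tail
def pvCntA (l r : Int) (rest : List (Int × Int)) : Int :=
  (rest.countP (fun p => decide (l ≤ p.1 ∧ p.1 ≤ r)) : Int)

-- pure total of A over the sorted cuts
def pvCountA : List (Int × Int) → Int
  | [] => 0
  | (l, r) :: rest => pvCntA l r rest + pvCountA rest

-- pure total of B's loop from index i on
def pvCountB (starts : List Int) : List (Int × Int) → Nat → Int
  | [], _ => 0
  | (_, r) :: rest, i =>
      (if i + 1 < pvBisectRight starts r 0 starts.length
       then (pvBisectRight starts r 0 starts.length : Int) - (i + 1) else 0)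
      + pvCountB starts rest (i + 1)

lemma pvCntA_nonneg (l r : Int) (rest : List (Int × Int)) : 0 ≤ pvCntA l r rest := by
  simp [pvCntA]

lemma pvCountA_nonneg : ∀ rest : List (Int × Int), 0 ≤ pvCountA rest := by
  intro rest
  induction rest with
  | nil => simp [pvCountA]
  | cons hd tl ih =>
      obtain ⟨l, r⟩ := hd
      have := pvCntA_nonneg l r tl
      simp only [pvCountA]; omega

lemma pvCountB_nonneg (starts : List Int) :
    ∀ (rest : List (Int × Int)) (i : Nat), 0 ≤ pvCountB starts rest i := by
  intro rest
  induction rest with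
  | nil => intro i; simp [pvCountB]
  | cons hd tl ih =>
      intro i
      obtain ⟨l, r⟩ := hd
      have h := ih (i + 1)
      simp only [pvCountB]
      split <;> omega


lemma pvCapEq {x y : Int} (h : x = y) :
    (if x > 100000000 then (none : Option Int) else some x)
      = (if y > 100000000 then none else some y) := by rw [h]

lemma pvAInner_eq (l r : Int) :
    ∀ (rest : List (Int × Int)) (total : Int), total ≤ 100000000 →
    pvAInner l r rest total =
      if total + pvCntA l r rest > 100000000 then none else some (total + pvCntA l r rest) := by
  intro rest
  induction rest with
  | nil => intro total ht; simp [pvAInner, pvCntA]; omega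
  | cons hd tl ih =>
      intro total ht
      obtain ⟨l2, r2⟩ := hd
      have hcnt : pvCntA l r ((l2, r2) :: tl) =
          (if l ≤ l2 ∧ l2 ≤ r then 1 else 0) + pvCntA l r tl := by
        simp [pvCntA, List.countP_cons]
        split <;> simp_all <;> omega
      have htl : 0 ≤ pvCntA l r tl := pvCntA_nonneg l r tl
      simp only [pvAInner]
      by_cases hc : l ≤ l2 ∧ l2 ≤ r
      · simp only [if_pos hc] at hcnt ⊢
        by_cases hcap : total + 1 > 100000000
        · rw [if_pos hcap, if_pos (by omega)]
        · rw [if_neg hcap, ih (total + 1) (by omega)]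
          exact pvCapEq (by omega)
      · simp only [if_neg hc] at hcnt ⊢
        rw [if_neg (by omega), ih total ht]
        exact pvCapEq (by omega)

lemma pvAOuter_eq :
    ∀ (cuts : List (Int × Int)) (total : Int), total ≤ 100000000 →
    pvAOuter cuts total =
      if total + pvCountA cuts > 100000000 then none else some (total + pvCountA cuts) := by
  intro cuts
  induction cuts with
  | nil => intro total ht; simp [pvAOuter, pvCountA]; omega
  | cons hd tl ih =>
      intro total ht
      obtain ⟨l, r⟩ := hd
      have htl : 0 ≤ pvCountA tl := pvCountA_nonneg tl
      have hc : 0 ≤ pvCntA l r tl := pvCntA_nonneg l r tl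
      simp only [pvAOuter, pvAInner_eq l r tl total ht, pvCountA]
      by_cases hcap : total + pvCntA l r tl > 100000000
      · rw [if_pos hcap, if_pos (by omega)]
      · rw [if_neg hcap]
        simp only
        rw [ih (total + pvCntA l r tl) (by omega)]
        exact pvCapEq (by omega)

lemma pvBLoop_eq (starts : List Int) :
    ∀ (rest : List (Int × Int)) (i : Nat) (total : Int), total ≤ 100000000 →
    pvBLoop starts rest i total =
      if total + pvCountB starts rest i > 100000000 then none
      else some (total + pvCountB starts rest i) := by
  intro rest
  induction rest with
  | nil => intro i total ht; simp [pvBLoop, pvCountB]; omega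
  | cons hd tl ih =>
      intro i total ht
      obtain ⟨l, r⟩ := hd
      have htl : 0 ≤ pvCountB starts tl (i + 1) := pvCountB_nonneg starts tl (i + 1)
      simp only [pvBLoop, pvCountB]
      by_cases hgt : i + 1 < pvBisectRight starts r 0 starts.length
      · simp only [if_pos hgt]
        by_cases hcap : total + ((pvBisectRight starts r 0 starts.length : Int) - (i + 1)) > 100000000
        · rw [if_pos (by exact_mod_cast hcap), if_pos (by push_cast; omega)]
        · rw [if_neg (by exact_mod_cast hcap),
              ih (i + 1) (total + ((pvBisectRight starts r 0 starts.length : Int) - ((i : Int) + 1))) (by omega)]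
          exact pvCapEq (by omega)
      · simp only [if_neg hgt]
        rw [ih (i + 1) total ht]
        exact pvCapEq (by omega)

-- a boundary position in a list splits it into ≤ x and > x parts; its position IS countP
lemma countP_boundary (xs : List Int) (x : Int) (r : Nat) (hr : r ≤ xs.length)
    (h1 : ∀ k, (h : k < xs.length) → k < r → xs[k] ≤ x)
    (h2 : ∀ k, (h : k < xs.length) → r ≤ k → x < xs[k]) :
    xs.countP (fun s => decide (s ≤ x)) = r := by
  have hsplit : xs = xs.take r ++ xs.drop r := (List.take_append_drop r xs).symm
  rw [hsplit, List.countP_append]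
  have htake : (xs.take r).countP (fun s => decide (s ≤ x)) = (xs.take r).length := by
    rw [List.countP_eq_length]
    intro y hy
    rw [List.mem_iff_getElem] at hy
    obtain ⟨k, hk, hyk⟩ := hy
    have hk' : k < xs.length := by
      have := List.length_take_le r xs; omega
    rw [List.getElem_take] at hyk
    simp only [decide_eq_true_eq]
    rw [← hyk]
    exact h1 k hk' (by simp [List.length_take] at hk; omega)
  have hdrop : (xs.drop r).countP (fun s => decide (s ≤ x)) = 0 := by
    rw [List.countP_eq_zero]
    intro y hy
    rw [List.mem_iff_getElem] at hy
    obtain ⟨k, hk, hyk⟩ := hy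
    rw [List.getElem_drop] at hyk
    simp only [decide_eq_true_eq]
    rw [← hyk]
    have := h2 (r + k) (by simp at hk; omega) (by omega)
    omega
  rw [htake, hdrop, List.length_take]
  omega

lemma pvBisectRight_eq_countP (xs : List Int) (x : Int)
    (hs : xs.Pairwise (· ≤ ·)) :
    pvBisectRight xs x 0 xs.length = xs.countP (fun s => decide (s ≤ x)) := by
  have hmono : ∀ i j, (hij : i ≤ j) → (h : j < xs.length) → xs[i]'(by omega) ≤ xs[j] := by
    intro i j hij h
    rcases Nat.lt_or_ge i j with hlt | hge
    · exact (List.pairwise_iff_getElem.mp hs) i j (by omega) h hlt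
    · have : i = j := by omega
      subst this; exact le_refl _
  suffices H : ∀ (n lo hi : Nat), hi - lo ≤ n → lo ≤ hi → hi ≤ xs.length →
      (∀ k, (h : k < xs.length) → k < lo → xs[k] ≤ x) →
      (∀ k, (h : k < xs.length) → hi ≤ k → x < xs[k]) →
      pvBisectRight xs x lo hi = xs.countP (fun s => decide (s ≤ x)) by
    exact H xs.length 0 xs.length (by omega) (by omega) (le_refl _)
      (by intro k h hk; omega) (by intro k h hk; omega)
  intro n
  induction n with
  | zero =>
      intro lo hi hn hle hlen h1 h2
      rw [pvBisectRight, if_neg (show ¬ lo < hi by omega)]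
      exact (countP_boundary xs x lo (by omega) h1 (fun k h hk => h2 k h (by omega))).symm
  | succ n ih =>
      intro lo hi hn hle hlen h1 h2
      rw [pvBisectRight]
      by_cases hlt : lo < hi
      · rw [if_pos hlt]
        have hmid : (lo + hi) / 2 < hi ∧ lo ≤ (lo + hi) / 2 := by omega
        have hmlen : (lo + hi) / 2 < xs.length := by omega
        have hget : xs.getD ((lo + hi) / 2) 0 = xs[(lo + hi) / 2] := List.getD_eq_getElem xs 0 hmlen
        by_cases hx : x < xs.getD ((lo + hi) / 2) 0
        · rw [if_pos hx]
          apply ih lo ((lo + hi) / 2) (by omega) (by omega) (by omega) h1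
          intro k h hk
          calc x < xs[(lo + hi) / 2] := by rw [← hget]; exact hx
            _ ≤ xs[k] := hmono _ _ hk h
        · rw [if_neg hx]
          apply ih ((lo + hi) / 2 + 1) hi (by omega) (by omega) hlen
          · intro k h hk
            rcases Nat.lt_or_ge k lo with hklo | hklo
            · exact h1 k h hklo
            · calc xs[k] ≤ xs[(lo + hi) / 2] := hmono _ _ (by omega) hmlen
                _ ≤ x := by rw [← hget]; omega
          · exact h2
      · rw [if_neg hlt]
        exact (countP_boundary xs x lo (by omega) h1 (fun k h hk => h2 k h (by omega))).symm

-- the core count equality: at each position of the sorted list, A's inner count equals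
-- B's clamped "insertion point minus i+1"
lemma pvCountA_eq_pvCountB :
    ∀ (cur pre : List (Int × Int)),
    (pre ++ cur).Pairwise (fun p q => p.1 ≤ q.1) →
    pvCountA cur = pvCountB ((pre ++ cur).map (fun p => p.1)) cur pre.length := by
  intro cur
  induction cur with
  | nil => intro pre _; simp [pvCountA, pvCountB]
  | cons hd tl ih =>
      intro pre hpw
      obtain ⟨l, r⟩ := hd
      have hIH := ih (pre ++ [(l, r)]) (by simpa using hpw)
      have hrw : (pre ++ [(l, r)]) ++ tl = pre ++ (l, r) :: tl := by simp
      rw [hrw] at hIH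
      simp only [List.length_append, List.length_cons, List.length_nil] at hIH
      set starts := (pre ++ (l, r) :: tl).map (fun p => p.1) with hstarts
      have hpwS : starts.Pairwise (· ≤ ·) := hpw.map _ (by intro p q h; exact h)
      have hbr : pvBisectRight starts r 0 starts.length
          = starts.countP (fun s => decide (s ≤ r)) := pvBisectRight_eq_countP starts r hpwS
      -- facts from the pairwise hypothesis
      have hsplit := (List.pairwise_append.mp hpw)
      have hpre : ∀ p ∈ pre, p.1 ≤ l := fun p hp => hsplit.2.2 p hp (l, r) (by simp)
      have htl : ∀ q ∈ tl, l ≤ q.1 := by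
        have := hsplit.2.1
        rw [List.pairwise_cons] at this
        exact fun q hq => this.1 q hq
      have hcntS : starts.countP (fun s => decide (s ≤ r))
          = (pre.map (fun p => p.1)).countP (fun s => decide (s ≤ r))
            + ((if l ≤ r then 1 else 0) + (tl.map (fun p => p.1)).countP (fun s => decide (s ≤ r))) := by
        rw [hstarts]
        simp only [List.map_append, List.map_cons, List.countP_append, List.countP_cons]
        by_cases hlr : l ≤ r
        · simp [hlr]; omega
        · simp [hlr]
      simp only [pvCountA, pvCountB, ← hIH]
      congr 1
      rw [hbr, hcntS]
      by_cases hlr : l ≤ r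
      · -- every prefix start is ≤ l ≤ r
        have hpreAll : (pre.map (fun p => p.1)).countP (fun s => decide (s ≤ r))
            = pre.length := by
          have : (pre.map (fun p => p.1)).countP (fun s => decide (s ≤ r))
              = (pre.map (fun p => p.1)).length := by
            rw [List.countP_eq_length]
            intro y hy
            simp only [List.mem_map] at hy
            obtain ⟨p, hp, hyp⟩ := hy
            simp only [decide_eq_true_eq]
            have := hpre p hp; omega
          simpa using this
        have hcnt : pvCntA l r tl
            = ((tl.map (fun p => p.1)).countP (fun s => decide (s ≤ r)) : Int) := by
          unfold pvCntA
          rw [List.countP_map]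
          congr 1
          apply List.countP_congr
          intro p hp
          have := htl p hp
          simp only [Function.comp]
          constructor <;> intro h <;> simp_all
        rw [hpreAll, if_pos hlr, hcnt]
        set c := (tl.map (fun p => p.1)).countP (fun s => decide (s ≤ r)) with hc
        by_cases hcpos : 0 < c
        · rw [if_pos (by omega)]; push_cast; ring
        · rw [if_neg (by omega)]; omega
      · -- r < l: nothing after position i can start at or before r
        have hcnt : pvCntA l r tl = 0 := by
          unfold pvCntA
          rw [List.countP_eq_zero.mpr]
          · simp
          · intro p hp
            have := htl p hp
            simp only [decide_eq_true_eq]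
            omega
        have htl0 : (tl.map (fun p => p.1)).countP (fun s => decide (s ≤ r)) = 0 := by
          rw [List.countP_eq_zero]
          intro y hy
          simp only [List.mem_map] at hy
          obtain ⟨p, hp, hyp⟩ := hy
          have := htl p hp
          simp only [decide_eq_true_eq]
          omega
        have hpreLe : (pre.map (fun p => p.1)).countP (fun s => decide (s ≤ r))
            ≤ pre.length := by
          simpa using List.countP_le_length (l := pre.map (fun p => p.1)) (p := fun s => decide (s ≤ r))
        rw [hcnt, if_neg hlr, htl0, if_neg (by omega)]

-- ===== VERDICT (by name: the statement is the Claim_ definition above) =====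
theorem solution_slow_spec : Claim_equal_solution_slow := by
  intro a _
  unfold Spec_solution_slow solution_slow solution_slow_alt
  dsimp only
  set cuts := PySem.List.sorted
      ((PySem.List.enumerate a).map (fun cr => (cr.1 - cr.2, cr.1 + cr.2)))
      (fun p => p.1) false with hcuts
  have hpw : cuts.Pairwise (fun p q => p.1 ≤ q.1) := PySem.List.sorted_pairwise _ _
  have hcount := pvCountA_eq_pvCountB cuts [] (by simpa using hpw)
  simp only [List.nil_append, List.length_nil] at hcount
  rw [pvAOuter_eq cuts 0 (by omega), pvBLoop_eq (cuts.map (fun p => p.1)) cuts 0 0 (by omega)]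
  simp only [zero_add, hcount]
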